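-- pv_equiv track=rewrite | github.com/PaNOSC-ViNYL/McStasScript | mcstasscript/helper/component_reader.py | correct_for_brackets
-- ===== SOURCE A (Python) =====
-- def correct_for_brackets(parameter_parts):
--     """
--     Given list of string elements, correct for brackets will
--     combine terms until curly brackets are balanced, for example:
--
--     ["A", "{B", "C", "D}", "E"] would return ["A", "{B,C,D}", "E"]
--
--     Default values of vectors can be given in such a manner in
--     McStas components, and without this each part would be recognized
--     as different parameters.
--     """
--     corrected_parts = []
--     index = 0
--     while True:
--
--         current_part = parameter_parts[index]
--         inner_index = 0
--         while True:
--             if current_part.count("{") == current_part.count("}"):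
--                 corrected_parts.append(current_part)
--                 index += inner_index
--                 break
--             else:
--                 inner_index += 1
--                 current_part += "," + parameter_parts[index+inner_index]
--
--         index += 1
--
--         if index >= len(parameter_parts):
--             break
--
--     return corrected_parts
-- ===== SOURCE B (Python) =====
-- def correct_for_brackets(parameter_parts):
--     """Single pass keeping a running {-minus-} balance; emit the joined
--     group whenever the balance returns to zero (no re-counting of the
--     accumulated string, no index arithmetic)."""
--     corrected_parts = []
--     current = None
--     balance = 0
--     for part in parameter_parts:
--         delta = part.count("{") - part.count("}")
--         if current is None:
--             current = part
--             balance = delta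
--         else:
--             current += "," + part
--             balance += delta
--         if balance == 0:
--             corrected_parts.append(current)
--             current = None
--     if current is not None:
--         corrected_parts.append(current)
--     return corrected_parts
-- ===== Notes on version B (the rewrite author's own statement) =====
-- stated objective: alternative
-- what changed: Replaces A's nested while-loops, which re-count '{'/'}' over the whole accumulated string on every merge step, by one linear pass that keeps a running brace-balance counter and emits the current group when it returns to zero.
import Mathlib
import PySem

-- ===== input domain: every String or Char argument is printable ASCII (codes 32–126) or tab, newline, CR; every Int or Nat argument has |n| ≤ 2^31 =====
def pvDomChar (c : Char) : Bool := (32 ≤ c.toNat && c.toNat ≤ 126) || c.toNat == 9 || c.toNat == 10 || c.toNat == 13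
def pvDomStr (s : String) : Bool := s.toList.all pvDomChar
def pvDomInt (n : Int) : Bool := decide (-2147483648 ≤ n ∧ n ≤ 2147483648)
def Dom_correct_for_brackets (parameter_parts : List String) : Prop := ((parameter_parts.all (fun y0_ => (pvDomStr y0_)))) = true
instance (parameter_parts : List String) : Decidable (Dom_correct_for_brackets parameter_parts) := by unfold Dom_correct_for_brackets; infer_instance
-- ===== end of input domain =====

-- B replaces A's nested while-loops (which re-count braces over the whole accumulated
-- string each merge step) by one linear pass with a running brace-balance counter.


-- ===== PORT A =====
-- Literal port of A's two nested `while True` loops; `index`/`inner_index` are the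
-- Python integer counters (always ≥ 0), list indexing is PySem.List.pyGet?.
-- Where Python raises IndexError (pyGet? = none) the port returns the current
-- `corrected_parts`; those inputs are excluded by Pre_ below.
mutual
def pvOuterA (parts : List String) (index : Nat) (acc : List String) : List String :=
  match _h : PySem.List.pyGet? parts (index : Int) with
  | none => acc
  | some current_part => pvInnerA parts index 0 current_part acc
termination_by (parts.length - index, 1)
decreasing_by exact Prod.Lex.right _ (by omega)

def pvInnerA (parts : List String) (index inner : Nat) (cur : String) (acc : List String) : List String :=
  if PySem.Str.count cur "{" = PySem.Str.count cur "}" then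
    let acc' := acc ++ [cur]
    let index' := index + inner + 1
    if _h2 : parts.length ≤ index' then acc' else pvOuterA parts index' acc'
  else
    match h : PySem.List.pyGet? parts ((index + inner + 1 : Nat) : Int) with
    | none => acc
    | some p => pvInnerA parts index (inner + 1) (cur ++ ("," ++ p)) acc
termination_by (parts.length - (index + inner), 0)
decreasing_by
  · exact Prod.Lex.left _ _ (by omega)
  · rw [PySem.List.pyGet?_natCast] at h
    have hlt : index + inner + 1 < parts.length := by
      rcases List.getElem?_eq_some_iff.mp h with ⟨hlt, -⟩
      exact hlt
    exact Prod.Lex.left _ _ (by omega)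
end

def correct_for_brackets (parameter_parts : List String) : List String :=
  pvOuterA parameter_parts 0 []

-- ===== PORT B =====
-- balance contribution of one part: part.count("{") - part.count("}")
def pvBal (s : String) : Int :=
  (PySem.Str.count s "{" : Int) - (PySem.Str.count s "}" : Int)

-- the for-loop of Source B: state = (current, balance, corrected_parts)
def pvGoAlt : List String → Option String → Int → List String → List String
  | [], none, _, out => out
  | [], some cur, _, out => out ++ [cur]
  | p :: rest, curOpt, bal, out =>
    let cur' : String := match curOpt with | none => p | some c => c ++ ("," ++ p)
    let bal' : Int := match curOpt with | none => pvBal p | some _ => bal + pvBal p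
    if bal' = 0 then pvGoAlt rest none bal' (out ++ [cur'])
    else pvGoAlt rest (some cur') bal' out

def correct_for_brackets_alt (parameter_parts : List String) : List String :=
  pvGoAlt parameter_parts none 0 []

-- ===== PRECONDITION & SPEC =====
-- A raises IndexError on the empty list and whenever the total '{'-minus-'}'
-- balance over all parts is nonzero (the last group never closes); Pre_ is
-- exactly the inputs on which the Python A returns normally.
def Pre_correct_for_brackets (parameter_parts : List String) : Prop :=
  parameter_parts ≠ [] ∧ (parameter_parts.map pvBal).sum = 0

instance (parameter_parts : List String) : Decidable (Pre_correct_for_brackets parameter_parts) := by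
  unfold Pre_correct_for_brackets; infer_instance

def pvWitness_correct_for_brackets : List String := ["A", "{B", "C,D}", "E"]

def Spec_correct_for_brackets (parameter_parts : List String) (out : List String) : Prop := out = correct_for_brackets_alt parameter_parts
instance (parameter_parts : List String) (out : List String) : Decidable (Spec_correct_for_brackets parameter_parts out) := by unfold Spec_correct_for_brackets; infer_instance

-- ===== CLAIM (what is proved, stated in full; the proofs are below) =====
def Claim_equal_correct_for_brackets : Prop := ∀ (parameter_parts : List String), Dom_correct_for_brackets parameter_parts → Pre_correct_for_brackets parameter_parts → Spec_correct_for_brackets parameter_parts (correct_for_brackets parameter_parts)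


-- ===== LEMMAS AND PROOFS =====

-- Python str.count with a 1-character needle counts that character.
lemma pvCountGo_one (c : Char) (l : List Char) (fuel acc : Nat) (hf : l.length ≤ fuel) :
    PySem.Chars.count.go [c] fuel l acc = acc + l.count c := by
  induction l generalizing fuel acc with
  | nil => cases fuel <;> simp [PySem.Chars.count.go]
  | cons h t ih =>
    cases fuel with
    | zero => simp at hf
    | succ f =>
      rw [PySem.Chars.count.go]
      have hft : t.length ≤ f := by simpa using hf
      by_cases hc : c = h
      · subst hc
        have hpre : ([c].isPrefixOf (c :: t)) = true := by simp [List.isPrefixOf]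
        rw [hpre]
        simp only [if_true, List.length_cons, List.length_nil, Nat.zero_add, List.drop_succ_cons,
          List.drop_zero]
        rw [ih f (acc + 1) hft]
        simp
        omega
      · have hpre : ([c].isPrefixOf (h :: t)) = false := by
          simp only [List.isPrefixOf, Bool.and_true]
          exact beq_eq_false_iff_ne.mpr hc
        rw [hpre]
        simp only [Bool.false_eq_true, if_false]
        rw [ih f acc hft]
        have : (h == c) = false := beq_eq_false_iff_ne.mpr (fun hh => hc hh.symm)
        simp [List.count_cons, this]

lemma pvCount_one (s : String) (sub : String) (c : Char) (h : sub.toList = [c]) :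
    PySem.Str.count s sub = s.toList.count c := by
  rw [PySem.Str.count_eq, h]
  unfold PySem.Chars.count
  simp only [List.isEmpty_cons, Bool.false_eq_true, if_false]
  rw [pvCountGo_one c s.toList s.toList.length 0 le_rfl]
  omega

lemma pvBal_eq (s : String) : pvBal s = (s.toList.count '{' : Int) - (s.toList.count '}' : Int) := by
  unfold pvBal
  rw [pvCount_one s "{" '{' rfl, pvCount_one s "}" '}' rfl]

lemma pvBal_append (s t : String) : pvBal (s ++ ("," ++ t)) = pvBal s + pvBal t := by
  simp only [pvBal_eq, String.toList_append]
  have h1 : (",".toList : List Char) = [','] := rfl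
  simp [List.count_append, h1]
  ring

lemma pvCond_iff (s : String) :
    (PySem.Str.count s "{" = PySem.Str.count s "}") ↔ pvBal s = 0 := by
  unfold pvBal; omega

-- The bisimulation: A's state (index, inner, cur) inside the inner loop versus
-- B's state (remaining list, current group, balance).
lemma pvMain : ∀ (N : Nat) (rest : List String), rest.length ≤ N →
    ∀ (parts : List String) (index inner : Nat) (cur : String) (acc : List String),
    List.drop (index + inner + 1) parts = rest →
    pvBal cur + (rest.map pvBal).sum = 0 →
    pvInnerA parts index inner cur acc =
      (if pvBal cur = 0 then pvGoAlt rest none 0 (acc ++ [cur])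
       else pvGoAlt rest (some cur) (pvBal cur) acc) := by
  intro N
  induction N with
  | zero =>
    intro rest hr parts index inner cur acc hdrop hbal
    have hrest : rest = [] := List.length_eq_zero_iff.mp (Nat.le_zero.mp hr)
    subst hrest
    simp only [List.map_nil, List.sum_nil, add_zero] at hbal
    rw [pvInnerA]
    rw [if_pos ((pvCond_iff cur).mpr hbal), if_pos hbal]
    have hlen : parts.length ≤ index + inner + 1 := List.drop_eq_nil_iff.mp hdrop
    simp [hlen, pvGoAlt]
  | succ n ih =>
    intro rest hr parts index inner cur acc hdrop hbal
    rw [pvInnerA]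
    by_cases hz : pvBal cur = 0
    · rw [if_pos ((pvCond_iff cur).mpr hz), if_pos hz]
      cases rest with
      | nil =>
        have hlen : parts.length ≤ index + inner + 1 := List.drop_eq_nil_iff.mp hdrop
        simp [hlen, pvGoAlt]
      | cons p rest' =>
        have hlt : index + inner + 1 < parts.length := by
          by_contra hc
          have h0 : List.drop (index + inner + 1) parts = [] :=
            List.drop_eq_nil_iff.mpr (by omega)
          exact absurd (hdrop.symm.trans h0) (List.cons_ne_nil p rest')
        have hget : parts[index + inner + 1]? = some p := by
          have h1 : (List.drop (index + inner + 1) parts)[0]? = parts[index + inner + 1 + 0]? :=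
            List.getElem?_drop
          rw [hdrop] at h1
          simpa using h1.symm
        have hdrop' : List.drop (index + inner + 1 + 0 + 1) parts = rest' := by
          have h2 : List.drop ((index + inner + 1) + 1) parts =
              List.drop 1 (List.drop (index + inner + 1) parts) := List.drop_drop.symm
          rw [hdrop] at h2
          simpa using h2
        rw [dif_neg (by omega)]
        rw [pvOuterA, PySem.List.pyGet?_natCast]
        split
        next h => rw [hget] at h; exact absurd h (by simp)
        next cp h =>
          rw [hget] at h
          injection h with h
          subst h
          rw [ih rest' (by simp only [List.length_cons] at hr; omega) parts
            (index + inner + 1) 0 p (acc ++ [cur]) hdrop'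
            (by simp only [List.map_cons, List.sum_cons] at hbal; omega)]
          simp only [pvGoAlt]
          by_cases hp : pvBal p = 0 <;> simp [hp]
    · rw [if_neg (fun hc => hz ((pvCond_iff cur).mp hc)), if_neg hz]
      cases rest with
      | nil =>
        exfalso
        simp only [List.map_nil, List.sum_nil, add_zero] at hbal
        exact hz hbal
      | cons p rest' =>
        have hget : parts[index + inner + 1]? = some p := by
          have h1 : (List.drop (index + inner + 1) parts)[0]? = parts[index + inner + 1 + 0]? :=
            List.getElem?_drop
          rw [hdrop] at h1
          simpa using h1.symm
        rw [PySem.List.pyGet?_natCast]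
        have hdrop' : List.drop (index + (inner + 1) + 1) parts = rest' := by
          have h2 : List.drop ((index + inner + 1) + 1) parts =
              List.drop 1 (List.drop (index + inner + 1) parts) := List.drop_drop.symm
          rw [hdrop] at h2
          have h3 : index + (inner + 1) + 1 = (index + inner + 1) + 1 := by omega
          rw [h3]
          simpa using h2
        have hbal' : pvBal (cur ++ ("," ++ p)) + (rest'.map pvBal).sum = 0 := by
          rw [pvBal_append]
          simp only [List.map_cons, List.sum_cons] at hbal
          omega
        split
        next h => rw [hget] at h; exact absurd h (by simp)
        next cp h =>
          rw [hget] at h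
          injection h with h
          subst h
          rw [ih rest' (by simp only [List.length_cons] at hr; omega)
            parts index (inner + 1) (cur ++ ("," ++ p)) acc hdrop' hbal']
          simp only [pvGoAlt, pvBal_append]
          by_cases hc : pvBal cur + pvBal p = 0 <;> simp [hc]

-- ===== VERDICT (by name: the statement is the Claim_ definition above) =====
theorem correct_for_brackets_spec : Claim_equal_correct_for_brackets := by
  intro parts _hdom hpre
  obtain ⟨hne, hsum⟩ := hpre
  unfold Spec_correct_for_brackets correct_for_brackets correct_for_brackets_alt
  cases parts with
  | nil => exact (hne rfl).elim
  | cons p rest =>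
    rw [pvOuterA, PySem.List.pyGet?_natCast]
    simp only [List.getElem?_cons_zero]
    simp only [List.map_cons, List.sum_cons] at hsum
    rw [pvMain rest.length rest le_rfl (p :: rest) 0 0 p [] (by simp) (by omega)]
    simp only [pvGoAlt]
    by_cases hp : pvBal p = 0 <;> simp [hp]
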